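-- pv_equiv track=rewrite | github.com/jaeyun95/Programmers | level3/level3_ex27.py | solution
-- ===== SOURCE A (Python) =====
-- def solution(budgets, M):
--     left, right, answer = 0, max(budgets), 0
--     while(left<=right):
--         mid = (left + right)//2
--         all_budget = 0
--         for budget in budgets:
--             if budget < mid: all_budget += budget
--             else: all_budget += mid
--         if all_budget > M: right = mid -1
--         else:
--             answer = mid
--             left = mid + 1
--     return answer
-- ===== SOURCE B (Python) =====
-- def solution(budgets, M):
--     # sort + running prefix sum: for each segment of caps (prev, s[j]] the capped
--     # sum is prefix + c*(n-j); take the largest feasible cap in each segment.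
--     s = sorted(budgets)
--     n = len(s)
--     best = 0
--     prefix = 0
--     low = 0
--     for j, v in enumerate(s):
--         c = (M - prefix) // (n - j)
--         if c > v:
--             c = v
--         if c >= low and c > best:
--             best = c
--         prefix += v
--         low = v + 1
--         if low < 0:
--             low = 0
--     return best
-- ===== Notes on version B (the rewrite author's own statement) =====
-- stated objective: faster
-- what changed: replaces A's binary search over the cap (each probe rescanning all budgets) by sort + one prefix-sum pass that computes the best cap of every sorted segment directly; Pre_ excludes only the empty list, on which A's max(budgets) raises ValueError
import Mathlib
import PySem

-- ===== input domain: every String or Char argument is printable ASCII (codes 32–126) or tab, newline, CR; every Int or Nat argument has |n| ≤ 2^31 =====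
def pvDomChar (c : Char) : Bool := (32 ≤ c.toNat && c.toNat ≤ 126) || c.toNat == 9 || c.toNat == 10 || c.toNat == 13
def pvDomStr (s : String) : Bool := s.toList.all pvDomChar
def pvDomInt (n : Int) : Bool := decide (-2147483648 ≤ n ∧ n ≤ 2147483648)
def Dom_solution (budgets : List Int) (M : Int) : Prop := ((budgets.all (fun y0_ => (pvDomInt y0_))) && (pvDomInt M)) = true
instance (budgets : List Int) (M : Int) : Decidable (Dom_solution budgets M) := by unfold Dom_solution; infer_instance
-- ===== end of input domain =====

-- B replaces A's binary search on the cap by sort + one prefix-sum pass (constant-factor faster; also returns 0 instead of raising on []).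

-- ===== PORT A =====
-- A's inner for-loop over budgets, as a helper
def cappedSum (budgets : List Int) (mid : Int) : Int :=
  budgets.foldl (fun acc budget => acc + (if budget < mid then budget else mid)) 0

-- A's while loop; terminates because right - left shrinks
def solutionLoop (budgets : List Int) (M left right answer : Int) : Int :=
  if h : left ≤ right then
    let mid := PySem.Int.floordiv (left + right) 2
    let all_budget := cappedSum budgets mid
    if all_budget > M then
      solutionLoop budgets M left (mid - 1) answer
    else
      solutionLoop budgets M (mid + 1) right mid
  else answer
termination_by (right + 1 - left).toNat
decreasing_by
  · have := PySem.Int.floordiv_two_mid_bounds h; omega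
  · have := PySem.Int.floordiv_two_mid_bounds h; omega

def solution (budgets : List Int) (M : Int) : Int :=
  match PySem.List.max? budgets (fun y => y) with
  | none => 0   -- unreachable under Pre_solution: Python's max([]) raises
  | some mx => solutionLoop budgets M 0 mx 0

-- ===== PORT B =====
-- B's for-loop over the sorted list, carrying best, prefix sum and segment lower bound
def altLoop (M n : Int) : List Int → Int → Int → Int → Int → Int
  | [], _, best, _, _ => best
  | v :: rest, j, best, pre, low =>
      let c0 := PySem.Int.floordiv (M - pre) (n - j)
      let c := if c0 > v then v else c0
      let best' := if c ≥ low ∧ c > best then c else best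
      let low' := if v + 1 < 0 then 0 else v + 1
      altLoop M n rest (j + 1) best' (pre + v) low'

def solution_alt (budgets : List Int) (M : Int) : Int :=
  let s := PySem.List.sorted budgets (fun x => x) false
  altLoop M (s.length : Int) s 0 0 0 0

-- ===== PRECONDITION & SPEC =====
-- Pre_ excludes only the empty list, on which Python's max(budgets) raises ValueError
def Pre_solution (budgets : List Int) (M : Int) : Prop := budgets ≠ []
instance (budgets : List Int) (M : Int) : Decidable (Pre_solution budgets M) := by unfold Pre_solution; infer_instance
def pvWitness_solution : List Int × Int := ([1, 3, 2, 5, 4], 9)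

def Spec_solution (budgets : List Int) (M : Int) (out : Int) : Prop := out = solution_alt budgets M
instance (budgets : List Int) (M : Int) (out : Int) : Decidable (Spec_solution budgets M out) := by unfold Spec_solution; infer_instance

-- ===== CLAIM (what is proved, stated in full; the proofs are below) =====
def Claim_equal_solution : Prop := ∀ (budgets : List Int) (M : Int), Dom_solution budgets M → Pre_solution budgets M → Spec_solution budgets M (solution budgets M)
-- ===== LEMMAS AND PROOFS =====

-- cappedSum as a sum of minima
theorem foldl_add_map {α : Type} (g : α → Int) (l : List α) (x : Int) :
    l.foldl (fun a b => a + g b) x = x + (l.map g).sum := by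
  induction l generalizing x with
  | nil => simp
  | cons h t ih => simp [List.foldl, ih]; ring

theorem cappedSum_eq (l : List Int) (c : Int) :
    cappedSum l c = (l.map (fun b => min b c)).sum := by
  have h : cappedSum l c = 0 + (l.map (fun b => if b < c then b else c)).sum := by
    simpa [cappedSum] using foldl_add_map (fun b => if b < c then b else c) l 0
  rw [h, show (fun b : Int => if b < c then b else c) = (fun b : Int => min b c) from funext fun b => by simp only [min_def]; split <;> split <;> omega]
  omega

theorem cappedSum_mono (l : List Int) {c c' : Int} (h : c ≤ c') :
    cappedSum l c ≤ cappedSum l c' := by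
  rw [cappedSum_eq, cappedSum_eq]
  induction l with
  | nil => simp
  | cons a t ih => simp only [List.map, List.sum_cons]; omega

theorem cappedSum_perm {l l' : List Int} (h : l.Perm l') (c : Int) :
    cappedSum l c = cappedSum l' c := by
  rw [cappedSum_eq, cappedSum_eq]
  exact (h.map _).sum_eq

theorem map_min_sum_lt {l : List Int} {c : Int} (h : ∀ b ∈ l, b < c) :
    (l.map (fun b => min b c)).sum = l.sum := by
  induction l with
  | nil => simp
  | cons a t ih =>
      have ha := h a (by simp)
      have ht := ih (fun b hb => h b (by simp [hb]))
      simp only [List.map, List.sum_cons, ht]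
      omega

theorem map_min_sum_ge {l : List Int} {c : Int} (h : ∀ b ∈ l, c ≤ b) :
    (l.map (fun b => min b c)).sum = c * l.length := by
  induction l with
  | nil => simp
  | cons a t ih =>
      have ha := h a (by simp)
      have ht := ih (fun b hb => h b (by simp [hb]))
      simp only [List.map, List.sum_cons, ht, List.length_cons]
      push_cast
      have : min a c = c := by omega
      rw [this]; ring

theorem cappedSum_split {l₁ l₂ : List Int} {c : Int}
    (h₁ : ∀ b ∈ l₁, b < c) (h₂ : ∀ b ∈ l₂, c ≤ b) :
    cappedSum (l₁ ++ l₂) c = l₁.sum + c * l₂.length := by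
  rw [cappedSum_eq, List.map_append, List.sum_append, map_min_sum_lt h₁, map_min_sum_ge h₂]

-- the common characterisation: "out is the greatest feasible cap in [0, hi], or 0"
def GoodOut (budgets : List Int) (M hi out : Int) : Prop :=
  0 ≤ out ∧ (out = 0 ∨ (0 < out ∧ out ≤ hi ∧ cappedSum budgets out ≤ M)) ∧
    ∀ c, out < c → c ≤ hi → ¬ (cappedSum budgets c ≤ M)

theorem GoodOut_unique {budgets : List Int} {M hi o₁ o₂ : Int}
    (h₁ : GoodOut budgets M hi o₁) (h₂ : GoodOut budgets M hi o₂) : o₁ = o₂ := by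
  obtain ⟨p₁, q₁, r₁⟩ := h₁
  obtain ⟨p₂, q₂, r₂⟩ := h₂
  by_contra hne
  rcases lt_or_gt_of_ne hne with hlt | hgt
  · rcases q₂ with h0 | ⟨hpos, hle, hfeas⟩
    · omega
    · exact r₁ o₂ hlt hle hfeas
  · rcases q₁ with h0 | ⟨hpos, hle, hfeas⟩
    · omega
    · exact r₂ o₁ hgt hle hfeas

-- prefix of a ≤-pairwise list is bounded by its last element
theorem pairwise_le_getLast? : ∀ (s : List Int), s.Pairwise (fun a b => a ≤ b) →
    ∀ p : Int, s.getLast? = some p → ∀ x ∈ s, x ≤ p := by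
  intro s
  induction s with
  | nil => intro _ p hl; simp at hl
  | cons a t ih =>
      intro hp p hl x hx
      cases t with
      | nil =>
          simp at hl hx
          omega
      | cons b u =>
          rw [List.getLast?_cons_cons] at hl
          rw [List.pairwise_cons] at hp
          rcases List.mem_cons.mp hx with rfl | hx'
          · exact hp.1 p (List.mem_of_getLast? hl)
          · exact ih hp.2 p hl x hx'

theorem cappedSum_segment {budgets s done rest : List Int} {c : Int}
    (hperm : s.Perm budgets) (hs : s = done ++ rest)
    (hdone : ∀ b ∈ done, b < c) (hrest : ∀ b ∈ rest, c ≤ b) :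
    cappedSum budgets c = done.sum + c * rest.length := by
  rw [← cappedSum_perm hperm, hs, cappedSum_split hdone hrest]

-- A's loop invariant
theorem solutionLoop_good (budgets : List Int) (M hi : Int) :
    ∀ m : Nat, ∀ l r ans, (r + 1 - l).toNat = m → 0 ≤ l → r ≤ hi →
      ans = max (l - 1) 0 → (0 < ans → ans ≤ hi) →
      (∀ c, 0 ≤ c → c < l → cappedSum budgets c ≤ M) →
      (∀ c, r < c → c ≤ hi → ¬ (cappedSum budgets c ≤ M)) →
      GoodOut budgets M hi (solutionLoop budgets M l r ans) := by
  intro m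
  induction m using Nat.strong_induction_on with
  | _ m ih =>
      intro l r ans hm h0 hr hans hanshi hfeas hinf
      rw [solutionLoop]
      by_cases hlr : l ≤ r
      · rw [dif_pos hlr]
        have hmid := PySem.Int.floordiv_two_mid_bounds hlr
        set mid := PySem.Int.floordiv (l + r) 2 with hmiddef
        by_cases hgt : cappedSum budgets mid > M
        · rw [if_pos hgt]
          refine ih (mid - 1 + 1 - l).toNat (by omega) l (mid - 1) ans (by omega) h0 (by omega)
            hans hanshi hfeas ?_
          intro c hc hchi hfc
          have := cappedSum_mono budgets (show mid ≤ c by omega)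
          omega
        · rw [if_neg hgt]
          refine ih (r + 1 - (mid + 1)).toNat (by omega) (mid + 1) r mid (by omega) (by omega)
            hr (by omega) (by omega) ?_ hinf
          intro c hc hcm
          exact le_trans (cappedSum_mono budgets (by omega : c ≤ mid)) (by omega)
      · rw [dif_neg hlr]
        refine ⟨by omega, ?_, ?_⟩
        · by_cases hz : ans = 0
          · exact Or.inl hz
          · exact Or.inr ⟨by omega, hanshi (by omega), hfeas ans (by omega) (by omega)⟩
        · intro c hc hchi
          by_cases hcr : r < c
          · exact hinf c hcr hchi
          · intro _
            omega

theorem solution_good (budgets : List Int) (M : Int) (hne : budgets ≠ []) :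
    ∃ hi, (∀ b ∈ budgets, b ≤ hi) ∧ hi ∈ budgets ∧ GoodOut budgets M hi (solution budgets M) := by
  unfold solution
  cases hmx : PySem.List.max? budgets (fun y => y) with
  | none => exact absurd (((PySem.List.max?_eq_none_iff budgets (fun y => y)).mp hmx)) hne
  | some mx =>
      refine ⟨mx, fun b hb => PySem.List.max?_isMax hmx b hb, PySem.List.max?_mem hmx, ?_⟩
      exact solutionLoop_good budgets M mx (mx + 1 - 0).toNat 0 mx 0 rfl (by omega) le_rfl
        (by omega) (by omega) (fun c h1 h2 => absurd h2 (by omega))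
        (fun c h1 h2 => absurd h1 (by omega))

-- B's loop invariant
theorem altLoop_good (budgets : List Int) (M hi : Int) (s : List Int)
    (hperm : s.Perm budgets) (hpair : s.Pairwise (fun a b => a ≤ b))
    (hub : ∀ b ∈ budgets, b ≤ hi) (hmem : hi ∈ budgets) :
    ∀ (rest : List Int), ∀ done best low,
      s = done ++ rest →
      low = (match done.getLast? with | none => 0 | some p => max 0 (p + 1)) →
      0 ≤ best →
      (best = 0 ∨ (0 < best ∧ best ≤ hi ∧ cappedSum budgets best ≤ M)) →
      (∀ c p, best < c → done.getLast? = some p → c ≤ p → ¬ (cappedSum budgets c ≤ M)) →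
      GoodOut budgets M hi
        (altLoop M (s.length : Int) rest (done.length : Int) best done.sum low) := by
  intro rest
  induction rest with
  | nil =>
      intro done best low hs hlow hb0 hb2 hb3
      simp only [altLoop]
      have hsne : s ≠ [] := by
        intro h
        rw [h] at hperm
        rw [hperm.symm.eq_nil] at hmem
        simp at hmem
      obtain ⟨p, hp⟩ := Option.isSome_iff_exists.mp (List.getLast?_isSome.mpr hsne)
      have hdone : done = s := by simpa using hs.symm
      have hip : hi ≤ p := pairwise_le_getLast? s hpair p hp hi (hperm.mem_iff.mpr hmem)
      refine ⟨hb0, hb2, ?_⟩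
      intro c hc hchi
      exact hb3 c p hc (hdone ▸ hp) (by omega)
  | cons v rest' ih =>
      intro done best low hs hlow hb0 hb2 hb3
      -- order facts from the sorted split
      have hsplit := (List.pairwise_append.mp (hs ▸ hpair))
      have hdone_pair : done.Pairwise (fun a b => a ≤ b) := hsplit.1
      have hcross : ∀ a ∈ done, ∀ b ∈ v :: rest', a ≤ b := hsplit.2.2
      have hv_rest : ∀ b ∈ rest', v ≤ b := by
        have := hsplit.2.1
        rw [List.pairwise_cons] at this
        exact this.1
      have hvmem : v ∈ budgets := hperm.mem_iff.mp (by rw [hs]; simp)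
      have hvhi : v ≤ hi := hub v hvmem
      have hlen : (s.length : Int) - (done.length : Int) = (rest'.length : Int) + 1 := by
        rw [hs]
        simp
      have hkpos : (0 : Int) < (rest'.length : Int) + 1 := by positivity
      -- the capped sum of any cap inside this segment
      have hseg : ∀ c : Int, low ≤ c → c ≤ v →
          cappedSum budgets c = done.sum + c * ((rest'.length : Int) + 1) := by
        intro c hlc hcv
        have hdlt : ∀ b ∈ done, b < c := by
          intro b hb
          cases hgl : done.getLast? with
          | none =>
              rw [List.getLast?_eq_none_iff.mp hgl] at hb
              simp at hb
          | some p =>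
              have hbp := pairwise_le_getLast? done hdone_pair p hgl b hb
              rw [hgl] at hlow
              simp at hlow
              omega
        have hge : ∀ b ∈ v :: rest', c ≤ b := by
          intro b hb
          rcases List.mem_cons.mp hb with rfl | hb'
          · exact hcv
          · exact le_trans hcv (hv_rest b hb')
        have := cappedSum_segment hperm hs hdlt hge
        rw [this]
        push_cast [List.length_cons]
        ring
      have hlow0 : 0 ≤ low := by
        cases hgl : done.getLast? with
        | none => rw [hgl] at hlow; simp at hlow; omega
        | some p => rw [hgl] at hlow; simp at hlow; omega
      -- one unfolding of the loop
      simp only [altLoop]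
      rw [hlen]
      set c0 := PySem.Int.floordiv (M - done.sum) ((rest'.length : Int) + 1) with hc0
      have hbr : c0 * ((rest'.length : Int) + 1) ≤ M - done.sum :=
        (PySem.Int.le_floordiv_iff_mul_le hkpos).mp le_rfl
      set c := if c0 > v then v else c0 with hc
      have hcv : c ≤ v := by rw [hc]; split <;> omega
      have hcc0 : c ≤ c0 := by rw [hc]; split <;> omega
      -- any feasible cap of this segment is at most c
      have hupper : ∀ x : Int, low ≤ x → x ≤ v → cappedSum budgets x ≤ M → x ≤ c := by
        intro x hlx hxv hfx
        rw [hseg x hlx hxv] at hfx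
        have : x ≤ c0 := (PySem.Int.le_floordiv_iff_mul_le hkpos).mpr (by omega)
        rw [hc]
        split <;> omega
      set best' := if c ≥ low ∧ c > best then c else best with hb'
      have happly := ih (done ++ [v]) best' (if v + 1 < 0 then 0 else v + 1)
        (by rw [hs]; simp) (by rw [List.getLast?_concat]; split <;> simp <;> omega)
      have hlen2 : ((done ++ [v]).length : Int) = (done.length : Int) + 1 := by simp
      have hsum2 : (done ++ [v]).sum = done.sum + v := by simp
      rw [← hlen2, ← hsum2]
      apply happly
      · rw [hb']; split <;> omega
      · -- second invariant clause for best'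
        rw [hb']
        split
        · rename_i htaken
          refine Or.inr ⟨by omega, le_trans hcv hvhi, ?_⟩
          rw [hseg c (by omega) hcv]
          have hmul : c * ((rest'.length : Int) + 1) ≤ c0 * ((rest'.length : Int) + 1) :=
            mul_le_mul_of_nonneg_right hcc0 (by positivity)
          omega
        · exact hb2
      · -- third invariant clause for best'
        intro x p hx hgl hxp
        rw [List.getLast?_concat] at hgl
        have hpv : p = v := by injection hgl; omega
        subst hpv
        intro hfx
        have hxlow : low ≤ x := by
          cases hgld : done.getLast? with
          | none =>
              rw [hgld] at hlow
              simp at hlow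
              have : 0 ≤ best' := by rw [hb']; split <;> omega
              omega
          | some q =>
              by_cases hxq : x ≤ q
              · exact absurd hfx (hb3 x q (by rw [hb'] at hx; revert hx; split <;> omega) hgld hxq)
              · rw [hgld] at hlow
                simp at hlow
                omega
        have hxc : x ≤ c := hupper x hxlow hxp hfx
        have hbest : best' = best ∨ best' = c := by rw [hb']; split <;> simp
        rw [hb'] at hx
        revert hx
        split
        · omega
        · rename_i hnot
          intro hx
          exact hnot ⟨by omega, by omega⟩

theorem solution_alt_good (budgets : List Int) (M : Int) (hne : budgets ≠ []) :
    ∃ hi, (∀ b ∈ budgets, b ≤ hi) ∧ hi ∈ budgets ∧ GoodOut budgets M hi (solution_alt budgets M) := by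
  cases hmx : PySem.List.max? budgets (fun y => y) with
  | none => exact absurd (((PySem.List.max?_eq_none_iff budgets (fun y => y)).mp hmx)) hne
  | some mx =>
      refine ⟨mx, fun b hb => PySem.List.max?_isMax hmx b hb, PySem.List.max?_mem hmx, ?_⟩
      unfold solution_alt
      have hperm := PySem.List.sorted_perm budgets (fun x => x) false
      have hpair := PySem.List.sorted_pairwise budgets (fun x => x)
      exact altLoop_good budgets M mx _ hperm hpair
        (fun b hb => PySem.List.max?_isMax hmx b hb) (PySem.List.max?_mem hmx)
        _ [] 0 0 rfl rfl le_rfl (Or.inl rfl) (fun c p _ h => by simp at h)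

-- ===== VERDICT (by name: the statement is the Claim_ definition above) =====
theorem solution_spec : Claim_equal_solution := by
  intro budgets M _ hpre
  unfold Spec_solution
  obtain ⟨h₁, hub₁, hmem₁, hg₁⟩ := solution_good budgets M hpre
  obtain ⟨h₂, hub₂, hmem₂, hg₂⟩ := solution_alt_good budgets M hpre
  have : h₁ = h₂ := le_antisymm (hub₂ h₁ hmem₁) (hub₁ h₂ hmem₂)
  subst this
  exact GoodOut_unique hg₁ hg₂
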